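-- pv_equiv track=rewrite | github.com/priyanka-golia/priyanka-golia.github.io | teaching/COL-750-COL7250/a2/demo_s5/erel.py | restricted_prod
-- ===== SOURCE A (Python) =====
-- def restricted_prod(r, s, domain):
--     """
--     Cartesian product of blocks from r and s, keeping only pairs in `domain`.
--     Used when updating with an action model.
--     """
--     result = []
--     for b in r:
--         for c in s:
--             block = [(x, y) for x in b for y in c if (x, y) in domain]
--             if block:
--                 result.append(block)
--     return result
-- ===== SOURCE B (Python) =====
-- def restricted_prod(r, s, domain):
--     """
--     Same result as A, but instead of testing every (x, y) pair of every block
--     pair against the domain list, index element occurrences once, iterate the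
--     (deduplicated) domain pairs, bucket the matches per block pair, and sort
--     each bucket back into A's position order.
--     """
--     rindex = {}
--     for i, b in enumerate(r):
--         for p, x in enumerate(b):
--             rindex.setdefault(x, []).append((i, p))
--     sindex = {}
--     for j, c in enumerate(s):
--         for q, y in enumerate(c):
--             sindex.setdefault(y, []).append((j, q))
--     buckets = {}
--     for (x, y) in dict.fromkeys(domain):
--         for (i, p) in rindex.get(x, []):
--             for (j, q) in sindex.get(y, []):
--                 buckets.setdefault((i, j), []).append((p, q, x, y))
--     result = []
--     for i in range(len(r)):
--         for j in range(len(s)):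
--             entries = buckets.get((i, j), [])
--             if entries:
--                 entries.sort(key=lambda e: (e[0], e[1]))
--                 result.append([(x, y) for (_p, _q, x, y) in entries])
--     return result
-- ===== Notes on version B (the rewrite author's own statement) =====
-- stated objective: faster
-- what changed: Instead of scanning the domain list for every (x,y) of every block pair, B indexes element occurrences once, iterates the deduplicated domain pairs, buckets matches per block pair, and sorts each bucket back into A's position order.
import Mathlib
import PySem

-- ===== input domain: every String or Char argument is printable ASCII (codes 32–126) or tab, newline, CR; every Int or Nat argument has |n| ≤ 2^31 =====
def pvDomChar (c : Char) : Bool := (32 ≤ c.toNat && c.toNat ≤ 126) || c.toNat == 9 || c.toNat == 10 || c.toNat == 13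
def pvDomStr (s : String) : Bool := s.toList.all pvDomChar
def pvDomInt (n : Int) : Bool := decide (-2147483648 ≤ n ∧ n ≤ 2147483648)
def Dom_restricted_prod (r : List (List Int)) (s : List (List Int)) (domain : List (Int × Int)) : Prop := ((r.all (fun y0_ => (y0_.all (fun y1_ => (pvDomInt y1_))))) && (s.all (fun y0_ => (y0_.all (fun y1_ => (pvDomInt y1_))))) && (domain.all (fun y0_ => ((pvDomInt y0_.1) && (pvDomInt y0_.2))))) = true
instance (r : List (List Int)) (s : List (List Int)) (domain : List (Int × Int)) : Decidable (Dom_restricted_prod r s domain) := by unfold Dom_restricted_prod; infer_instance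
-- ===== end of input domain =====

-- B replaces A's domain-list scan inside a quadruple loop by occurrence indexes, one pass over the
-- deduplicated domain bucketing matches per block pair, and a per-bucket sort restoring A's order
-- (measurably faster; equal return value proved below).

-- ===== PORT A =====
def restricted_prod (r : List (List Int)) (s : List (List Int)) (domain : List (Int × Int)) : List (List (Int × Int)) :=
  r.foldl (fun result b =>
    s.foldl (fun result c =>
      let block := b.flatMap (fun x => c.filterMap (fun y => if (x, y) ∈ domain then some (x, y) else none))
      if block ≠ [] then result ++ [block] else result) result) []

-- ===== PORT B =====
def restricted_prod_alt (r : List (List Int)) (s : List (List Int)) (domain : List (Int × Int)) : List (List (Int × Int)) :=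
  let rindex : PySem.Dict Int (List (Int × Int)) :=
    (PySem.List.enumerate r).foldl (fun d ib =>
      (PySem.List.enumerate ib.2).foldl (fun d px => d.modify px.2 [] (· ++ [(ib.1, px.1)])) d) PySem.Dict.empty
  let sindex : PySem.Dict Int (List (Int × Int)) :=
    (PySem.List.enumerate s).foldl (fun d jc =>
      (PySem.List.enumerate jc.2).foldl (fun d qy => d.modify qy.2 [] (· ++ [(jc.1, qy.1)])) d) PySem.Dict.empty
  let buckets : PySem.Dict (Int × Int) (List (Int × Int × Int × Int)) :=
    (PySem.List.dedup domain).foldl (fun d xy =>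
      (rindex.getD xy.1 []).foldl (fun d ip =>
        (sindex.getD xy.2 []).foldl (fun d jq =>
          d.modify (ip.1, jq.1) [] (· ++ [(ip.2, jq.2, xy.1, xy.2)])) d) d) PySem.Dict.empty
  (PySem.List.pyRange 0 (PySem.List.len r)).foldl (fun result i =>
    (PySem.List.pyRange 0 (PySem.List.len s)).foldl (fun result j =>
      let entries := buckets.getD (i, j) []
      if entries ≠ [] then
        result ++ [(PySem.List.sorted entries (fun e => toLex (e.1, e.2.1))).map (fun e => (e.2.2.1, e.2.2.2))]
      else result) result) []

-- ===== PRECONDITION & SPEC =====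
def Spec_restricted_prod (r : List (List Int)) (s : List (List Int)) (domain : List (Int × Int)) (out : List (List (Int × Int))) : Prop := out = restricted_prod_alt r s domain
instance (r : List (List Int)) (s : List (List Int)) (domain : List (Int × Int)) (out : List (List (Int × Int))) : Decidable (Spec_restricted_prod r s domain out) := by unfold Spec_restricted_prod; infer_instance

-- ===== CLAIM (what is proved, stated in full; the proofs are below) =====
def Claim_equal_restricted_prod : Prop := ∀ (r : List (List Int)) (s : List (List Int)) (domain : List (Int × Int)), Dom_restricted_prod r s domain → Spec_restricted_prod r s domain (restricted_prod r s domain)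

-- ===== LEMMAS AND PROOFS =====

-- The inner comprehension of A, for one pair of blocks.
def rpBlock (domain : List (Int × Int)) (b c : List Int) : List (Int × Int) :=
  b.flatMap (fun x => c.filterMap (fun y => if (x, y) ∈ domain then some (x, y) else none))

-- B's occurrence index (rindex/sindex are this applied to r and s).
def rpIndex (l : List (List Int)) : PySem.Dict Int (List (Int × Int)) :=
  (PySem.List.enumerate l).foldl (fun d ib =>
    (PySem.List.enumerate ib.2).foldl (fun d px => d.modify px.2 [] (· ++ [(ib.1, px.1)])) d) PySem.Dict.empty

-- B's buckets dictionary.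
def rpBuckets (r : List (List Int)) (s : List (List Int)) (domain : List (Int × Int)) :
    PySem.Dict (Int × Int) (List (Int × Int × Int × Int)) :=
  (PySem.List.dedup domain).foldl (fun d xy =>
    ((rpIndex r).getD xy.1 []).foldl (fun d ip =>
      ((rpIndex s).getD xy.2 []).foldl (fun d jq =>
        d.modify (ip.1, jq.1) [] (· ++ [(ip.2, jq.2, xy.1, xy.2)])) d) d) PySem.Dict.empty

def rpKey (e : Int × Int × Int × Int) : Lex (Int × Int) := toLex (e.1, e.2.1)
def rpVal (e : Int × Int × Int × Int) : Int × Int := (e.2.2.1, e.2.2.2)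

-- The bucket of one block pair, listed in A's traversal order.
def rpTarget (domain : List (Int × Int)) (b c : List Int) : List (Int × Int × Int × Int) :=
  (PySem.List.enumerate b).flatMap (fun px =>
    (PySem.List.enumerate c).filterMap (fun qy =>
      if (px.2, qy.2) ∈ domain then some (px.1, qy.1, px.2, qy.2) else none))

-- The index-building loop flattened to (key, value) pairs.
def rpPairs (l : List (List Int)) : List (Int × (Int × Int)) :=
  (PySem.List.enumerate l).flatMap (fun ib =>
    (PySem.List.enumerate ib.2).map (fun px => (px.2, (ib.1, px.1))))

-- The bucket-building loop flattened to (key, value) pairs.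
def rpBPairs (r : List (List Int)) (s : List (List Int)) (domain : List (Int × Int)) :
    List ((Int × Int) × (Int × Int × Int × Int)) :=
  (PySem.List.dedup domain).flatMap (fun xy =>
    ((rpIndex r).getD xy.1 []).flatMap (fun ip =>
      ((rpIndex s).getD xy.2 []).map (fun jq => ((ip.1, jq.1), (ip.2, jq.2, xy.1, xy.2)))))

lemma pairwise_rpPairs (l : List (List Int)) :
    (rpPairs l).Pairwise (fun u v => toLex u.2 < toLex v.2) := by
  unfold rpPairs
  rw [List.pairwise_flatMap]
  constructor
  · intro ib _
    rw [List.pairwise_map]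
    refine List.Pairwise.imp ?_ (PySem.List.pairwise_lt_enumerate ib.2 0)
    intro a b hab
    rw [Prod.Lex.toLex_lt_toLex]
    exact Or.inr ⟨rfl, hab⟩
  · refine List.Pairwise.imp ?_ (PySem.List.pairwise_lt_enumerate l 0)
    intro a b hab u hu v hv
    obtain ⟨pa, _, rfl⟩ := List.mem_map.mp hu
    obtain ⟨pb, _, rfl⟩ := List.mem_map.mp hv
    rw [Prod.Lex.toLex_lt_toLex]
    exact Or.inl hab

lemma rpIndex_getD (l : List (List Int)) (x : Int) :
    (rpIndex l).getD x [] = ((rpPairs l).filter (fun p => p.1 == x)).map (·.2) := by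
  have h := PySem.Dict.getD_foldl_modify_append (rpPairs l) PySem.Dict.empty x
  unfold rpPairs at h
  rw [List.foldl_flatMap] at h
  simp only [List.foldl_map] at h
  unfold rpIndex rpPairs
  rw [h]
  simp [PySem.Dict.getD_of_not_contains]

lemma mem_rpIndex (l : List (List Int)) (x : Int) (v : Int × Int) :
    v ∈ (rpIndex l).getD x [] ↔
      ∃ (ki : Nat) (h : ki < l.length) (kp : Nat) (_ : kp < l[ki].length),
        v = ((ki : Int), (kp : Int)) ∧ l[ki][kp] = x := by
  rw [rpIndex_getD]
  simp only [List.mem_map, List.mem_filter, rpPairs, List.mem_flatMap,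
    PySem.List.mem_enumerate_iff, beq_iff_eq, zero_add]
  constructor
  · rintro ⟨u, ⟨⟨ib, ⟨ki, hki, rfl⟩, ⟨px, ⟨kp, hkp, rfl⟩, rfl⟩⟩, hx⟩, rfl⟩
    exact ⟨ki, hki, kp, hkp, rfl, hx⟩
  · rintro ⟨ki, hki, kp, hkp, rfl, rfl⟩
    exact ⟨(l[ki][kp], ((ki : Int), (kp : Int))),
      ⟨⟨((ki : Int), l[ki]), ⟨ki, hki, by simp⟩,
        ⟨((kp : Int), l[ki][kp]), ⟨kp, hkp, by simp⟩, rfl⟩⟩, rfl⟩, rfl⟩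

lemma pairwise_rpIndex (l : List (List Int)) (x : Int) :
    ((rpIndex l).getD x []).Pairwise (fun u v => toLex u < toLex v) := by
  rw [rpIndex_getD]
  rw [List.pairwise_map]
  exact List.Pairwise.sublist List.filter_sublist (pairwise_rpPairs l)

lemma nodup_rpIndex (l : List (List Int)) (x : Int) : ((rpIndex l).getD x []).Nodup := by
  refine List.Pairwise.imp ?_ (pairwise_rpIndex l x)
  intro a b hlt heq
  exact absurd (heq ▸ hlt) (lt_irrefl _)

lemma rpBuckets_getD (r s : List (List Int)) (domain : List (Int × Int)) (k : Int × Int) :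
    (rpBuckets r s domain).getD k [] = ((rpBPairs r s domain).filter (fun p => p.1 == k)).map (·.2) := by
  have h := PySem.Dict.getD_foldl_modify_append (rpBPairs r s domain) PySem.Dict.empty k
  unfold rpBPairs at h
  rw [List.foldl_flatMap] at h
  simp only [List.foldl_flatMap, List.foldl_map] at h
  unfold rpBuckets rpBPairs
  rw [h]
  simp [PySem.Dict.getD_of_not_contains]

lemma mem_rpBuckets (r s : List (List Int)) (domain : List (Int × Int)) (i j p q x y : Int) :
    (p, q, x, y) ∈ (rpBuckets r s domain).getD (i, j) [] ↔
      (x, y) ∈ domain ∧ (i, p) ∈ (rpIndex r).getD x [] ∧ (j, q) ∈ (rpIndex s).getD y [] := by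
  rw [rpBuckets_getD]
  simp only [rpBPairs, List.mem_map, List.mem_filter, List.mem_flatMap,
    PySem.List.mem_dedup, beq_iff_eq]
  constructor
  · rintro ⟨u, ⟨⟨⟨x1, y1⟩, hxy, ⟨i1, p1⟩, hip, ⟨⟨j1, q1⟩, hjq, rfl⟩⟩, hk⟩, hval⟩
    simp only [Prod.mk.injEq] at hk hval
    obtain ⟨rfl, rfl⟩ := hk
    obtain ⟨rfl, rfl, rfl, rfl⟩ := hval
    exact ⟨hxy, hip, hjq⟩
  · rintro ⟨hdom, hip, hjq⟩
    exact ⟨((i, j), (p, q, x, y)),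
      ⟨⟨(x, y), hdom, (i, p), hip, ⟨(j, q), hjq, rfl⟩⟩, rfl⟩, rfl⟩

lemma pairwise_vals_rpBPairs (r s : List (List Int)) (domain : List (Int × Int)) :
    (rpBPairs r s domain).Pairwise (fun u v => u.1 = v.1 → u.2 ≠ v.2) := by
  unfold rpBPairs
  rw [List.pairwise_flatMap]
  refine ⟨?_, ?_⟩
  · intro xy _
    rw [List.pairwise_flatMap]
    refine ⟨?_, ?_⟩
    · intro ip _
      rw [List.pairwise_map]
      refine List.Pairwise.imp ?_ (nodup_rpIndex s xy.2)
      rintro ⟨a1, a2⟩ ⟨b1, b2⟩ hne hkey hval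
      simp only [Prod.mk.injEq] at hkey hval
      exact hne (by simp [hkey.2, hval.2.1])
    · refine List.Pairwise.imp ?_ (nodup_rpIndex r xy.1)
      rintro ⟨i1, p1⟩ ⟨i2, p2⟩ hne u hu v hv hkey hval
      obtain ⟨a, _, rfl⟩ := List.mem_map.mp hu
      obtain ⟨b, _, rfl⟩ := List.mem_map.mp hv
      simp only [Prod.mk.injEq] at hkey hval
      exact hne (by simp [hkey.1, hval.1])
  · refine List.Pairwise.imp ?_ (PySem.List.nodup_dedup domain)
    rintro ⟨x1, y1⟩ ⟨x2, y2⟩ hne u hu v hv _ hval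
    obtain ⟨ip, _, hu2⟩ := List.mem_flatMap.mp hu
    obtain ⟨jp, _, hv2⟩ := List.mem_flatMap.mp hv
    obtain ⟨a, _, rfl⟩ := List.mem_map.mp hu2
    obtain ⟨b, _, rfl⟩ := List.mem_map.mp hv2
    simp only [Prod.mk.injEq] at hval
    exact hne (by simp [hval.2.2.1, hval.2.2.2])

lemma nodup_rpBuckets (r s : List (List Int)) (domain : List (Int × Int)) (k : Int × Int) :
    ((rpBuckets r s domain).getD k []).Nodup := by
  rw [rpBuckets_getD]
  have h1 : ((rpBPairs r s domain).filter (fun p => p.1 == k)).Pairwise (fun u v => u.2 ≠ v.2) := by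
    rw [List.pairwise_filter]
    refine List.Pairwise.imp ?_ (pairwise_vals_rpBPairs r s domain)
    intro u v h hu hv
    rw [beq_iff_eq] at hu hv
    exact h (hu.trans hv.symm)
  exact List.Pairwise.map _ (fun a b h => h) h1

lemma pairwise_rpTarget (domain : List (Int × Int)) (b c : List Int) :
    (rpTarget domain b c).Pairwise (fun u v => rpKey u < rpKey v) := by
  unfold rpTarget
  rw [List.pairwise_flatMap]
  constructor
  · intro px _
    rw [List.pairwise_filterMap]
    refine List.Pairwise.imp ?_ (PySem.List.pairwise_lt_enumerate c 0)
    intro a b hab u hu v hv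
    have hu' : u = (px.1, a.1, px.2, a.2) := by
      by_cases h : (px.2, a.2) ∈ domain
      · rw [if_pos h] at hu; exact (Option.some.inj hu).symm
      · rw [if_neg h] at hu; cases hu
    have hv' : v = (px.1, b.1, px.2, b.2) := by
      by_cases h : (px.2, b.2) ∈ domain
      · rw [if_pos h] at hv; exact (Option.some.inj hv).symm
      · rw [if_neg h] at hv; cases hv
    subst hu' hv'
    show toLex (px.1, a.1) < toLex (px.1, b.1)
    rw [Prod.Lex.toLex_lt_toLex]
    exact Or.inr ⟨rfl, hab⟩
  · refine List.Pairwise.imp ?_ (PySem.List.pairwise_lt_enumerate b 0)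
    intro a b' hab u hu v hv
    obtain ⟨qa, _, hqa⟩ := List.mem_filterMap.mp hu
    obtain ⟨qb, _, hqb⟩ := List.mem_filterMap.mp hv
    have hu' : u = (a.1, qa.1, a.2, qa.2) := by
      by_cases h : (a.2, qa.2) ∈ domain
      · rw [if_pos h] at hqa; exact (Option.some.inj hqa).symm
      · rw [if_neg h] at hqa; cases hqa
    have hv' : v = (b'.1, qb.1, b'.2, qb.2) := by
      by_cases h : (b'.2, qb.2) ∈ domain
      · rw [if_pos h] at hqb; exact (Option.some.inj hqb).symm
      · rw [if_neg h] at hqb; cases hqb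
    subst hu' hv'
    show toLex (a.1, qa.1) < toLex (b'.1, qb.1)
    rw [Prod.Lex.toLex_lt_toLex]
    exact Or.inl hab

lemma nodup_rpTarget (domain : List (Int × Int)) (b c : List Int) : (rpTarget domain b c).Nodup := by
  refine List.Pairwise.imp ?_ (pairwise_rpTarget domain b c)
  intro a b hlt heq
  exact absurd (heq ▸ hlt) (lt_irrefl _)

lemma mem_rpTarget (domain : List (Int × Int)) (bl cl : List Int) (p q x y : Int) :
    (p, q, x, y) ∈ rpTarget domain bl cl ↔
      ∃ (kp : Nat) (hp : kp < bl.length) (kq : Nat) (hq : kq < cl.length),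
        p = (kp : Int) ∧ q = (kq : Int) ∧ bl[kp] = x ∧ cl[kq] = y ∧ (x, y) ∈ domain := by
  unfold rpTarget
  simp only [List.mem_flatMap, List.mem_filterMap, PySem.List.mem_enumerate_iff, zero_add]
  constructor
  · rintro ⟨px, ⟨kp, hp, rfl⟩, ⟨qy, ⟨kq, hq, rfl⟩, heq⟩⟩
    by_cases h : (bl[kp], cl[kq]) ∈ domain
    · rw [if_pos h] at heq
      simp only [Option.some.injEq, Prod.mk.injEq] at heq
      obtain ⟨rfl, rfl, rfl, rfl⟩ := heq
      exact ⟨kp, hp, kq, hq, rfl, rfl, rfl, rfl, h⟩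
    · rw [if_neg h] at heq; cases heq
  · rintro ⟨kp, hp, kq, hq, rfl, rfl, rfl, rfl, hdom⟩
    exact ⟨((kp : Int), bl[kp]), ⟨kp, hp, rfl⟩,
      ⟨((kq : Int), cl[kq]), ⟨kq, hq, rfl⟩, by rw [if_pos hdom]⟩⟩

lemma map_rpTarget (domain : List (Int × Int)) (b c : List Int) :
    (rpTarget domain b c).map rpVal = rpBlock domain b c := by
  unfold rpTarget rpBlock
  rw [List.map_flatMap]
  simp only [List.map_filterMap, apply_ite (Option.map rpVal), Option.map_some, Option.map_none, rpVal]
  have hb := PySem.List.map_snd_enumerate b 0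
  have hc := PySem.List.map_snd_enumerate c 0
  conv_rhs => rw [← hb, ← hc]
  rw [List.flatMap_map]
  simp only [List.filterMap_map]
  rfl

lemma perm_rpBuckets_rpTarget (r s : List (List Int)) (domain : List (Int × Int))
    (ni nj : Nat) (hni : ni < r.length) (hnj : nj < s.length) :
    (rpTarget domain r[ni] s[nj]).Perm ((rpBuckets r s domain).getD ((ni : Int), (nj : Int)) []) := by
  refine (List.perm_ext_iff_of_nodup (nodup_rpTarget _ _ _) (nodup_rpBuckets _ _ _ _)).mpr ?_
  rintro ⟨p, q, x, y⟩
  rw [mem_rpTarget, mem_rpBuckets]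
  constructor
  · rintro ⟨kp, hp, kq, hq, rfl, rfl, rfl, rfl, hdom⟩
    exact ⟨hdom, (mem_rpIndex r _ _).mpr ⟨ni, hni, kp, hp, rfl, rfl⟩,
      (mem_rpIndex s _ _).mpr ⟨nj, hnj, kq, hq, rfl, rfl⟩⟩
  · rintro ⟨hdom, hip, hjq⟩
    obtain ⟨ki, hki, kp, hkp, heq, hx⟩ := (mem_rpIndex r _ _).mp hip
    obtain ⟨kj, hkj, kq, hkq, heq2, hy⟩ := (mem_rpIndex s _ _).mp hjq
    simp only [Prod.mk.injEq, Int.natCast_inj] at heq heq2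
    obtain ⟨hni', rfl⟩ := heq
    obtain ⟨hnj', rfl⟩ := heq2
    subst hni' hnj'
    exact ⟨kp, hkp, kq, hkq, rfl, rfl, hx, hy, hdom⟩

lemma sorted_rpBuckets (r s : List (List Int)) (domain : List (Int × Int))
    (ni nj : Nat) (hni : ni < r.length) (hnj : nj < s.length) :
    PySem.List.sorted ((rpBuckets r s domain).getD ((ni : Int), (nj : Int)) []) rpKey
      = rpTarget domain r[ni] s[nj] := by
  exact PySem.List.sorted_eq_of_perm_of_pairwise_lt _ _ rpKey
    (perm_rpBuckets_rpTarget r s domain ni nj hni hnj) (pairwise_rpTarget domain _ _)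

lemma A_eq (r s : List (List Int)) (domain : List (Int × Int)) :
    restricted_prod r s domain =
      (PySem.List.pyRange 0 (PySem.List.len r)).flatMap (fun i =>
        ((PySem.List.pyRange 0 (PySem.List.len s)).filter (fun j =>
            decide (rpBlock domain (PySem.List.pyGetD r i []) (PySem.List.pyGetD s j []) ≠ []))).map (fun j =>
          rpBlock domain (PySem.List.pyGetD r i []) (PySem.List.pyGetD s j []))) := by
  unfold restricted_prod
  have hinner : ∀ (res : List (List (Int × Int))) (b : List Int),
      s.foldl (fun result c =>
        let block := b.flatMap (fun x => c.filterMap (fun y => if (x, y) ∈ domain then some (x, y) else none))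
        if block ≠ [] then result ++ [block] else result) res
      = res ++ (s.filter (fun c => decide (rpBlock domain b c ≠ []))).map (fun c => rpBlock domain b c) := by
    intro res b
    exact PySem.List.foldl_append_ite (fun c => rpBlock domain b c ≠ []) (fun c => rpBlock domain b c) s res
  simp only [hinner]
  rw [PySem.List.foldl_append_eq_flatMap
    (fun b => (s.filter (fun c => decide (rpBlock domain b c ≠ []))).map (fun c => rpBlock domain b c)) r []]
  rw [List.nil_append]
  have hr := PySem.List.map_pyGetD_pyRange_zero r []
  have hs := PySem.List.map_pyGetD_pyRange_zero s []
  conv_lhs => rw [← hr]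
  rw [List.flatMap_map]
  refine List.flatMap_congr ?_
  intro i _
  conv_lhs => rw [← hs]
  rw [List.filter_map, List.map_map]
  rfl

lemma B_eq (r s : List (List Int)) (domain : List (Int × Int)) :
    restricted_prod_alt r s domain =
      (PySem.List.pyRange 0 (PySem.List.len r)).flatMap (fun i =>
        ((PySem.List.pyRange 0 (PySem.List.len s)).filter (fun j =>
            decide ((rpBuckets r s domain).getD (i, j) [] ≠ []))).map (fun j =>
          (PySem.List.sorted ((rpBuckets r s domain).getD (i, j) []) rpKey).map rpVal)) := by
  show (PySem.List.pyRange 0 (PySem.List.len r)).foldl (fun result i =>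
      (PySem.List.pyRange 0 (PySem.List.len s)).foldl (fun result j =>
        let entries := (rpBuckets r s domain).getD (i, j) []
        if entries ≠ [] then result ++ [(PySem.List.sorted entries rpKey).map rpVal] else result) result) []
    = _
  have hinner : ∀ (res : List (List (Int × Int))) (i : Int),
      (PySem.List.pyRange 0 (PySem.List.len s)).foldl (fun result j =>
        let entries := (rpBuckets r s domain).getD (i, j) []
        if entries ≠ [] then result ++ [(PySem.List.sorted entries rpKey).map rpVal] else result) res
      = res ++ ((PySem.List.pyRange 0 (PySem.List.len s)).filter (fun j =>
          decide ((rpBuckets r s domain).getD (i, j) [] ≠ []))).map (fun j =>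
            (PySem.List.sorted ((rpBuckets r s domain).getD (i, j) []) rpKey).map rpVal) := by
    intro res i
    exact PySem.List.foldl_append_ite (fun j => (rpBuckets r s domain).getD (i, j) [] ≠ [])
      (fun j => (PySem.List.sorted ((rpBuckets r s domain).getD (i, j) []) rpKey).map rpVal) _ res
  simp only [hinner]
  rw [PySem.List.foldl_append_eq_flatMap]
  rw [List.nil_append]

-- ===== VERDICT (by name: the statement is the Claim_ definition above) =====
theorem restricted_prod_spec : Claim_equal_restricted_prod := by
  intro r s domain _
  unfold Spec_restricted_prod
  rw [A_eq, B_eq]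
  refine List.flatMap_congr ?_
  intro i hi
  rw [PySem.List.mem_pyRange_one] at hi
  obtain ⟨ni, rfl⟩ : ∃ ni : Nat, i = (ni : Int) := ⟨i.toNat, (Int.toNat_of_nonneg hi.1).symm⟩
  have hniLt : ni < r.length := by
    have h := hi.2; simp only [PySem.List.len] at h; exact_mod_cast h
  have hgetr : PySem.List.pyGetD r ((ni : Nat) : Int) [] = r[ni] := by
    rw [PySem.List.pyGetD_natCast]; exact List.getD_eq_getElem r [] hniLt
  have hcond : ∀ j ∈ PySem.List.pyRange 0 (PySem.List.len s),
      decide (rpBlock domain (PySem.List.pyGetD r ((ni : Nat) : Int) []) (PySem.List.pyGetD s j []) ≠ [])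
        = decide ((rpBuckets r s domain).getD (((ni : Nat) : Int), j) [] ≠ []) := by
    intro j hj
    rw [PySem.List.mem_pyRange_one] at hj
    obtain ⟨nj, rfl⟩ : ∃ nj : Nat, j = (nj : Int) := ⟨j.toNat, (Int.toNat_of_nonneg hj.1).symm⟩
    have hnjLt : nj < s.length := by
      have h := hj.2; simp only [PySem.List.len] at h; exact_mod_cast h
    have hgets : PySem.List.pyGetD s ((nj : Nat) : Int) [] = s[nj] := by
      rw [PySem.List.pyGetD_natCast]; exact List.getD_eq_getElem s [] hnjLt
    rw [hgetr, hgets]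
    apply decide_eq_decide.mpr
    apply not_congr
    have hperm := perm_rpBuckets_rpTarget r s domain ni nj hniLt hnjLt
    have hmap := map_rpTarget domain (r[ni]) (s[nj])
    constructor
    · intro hb
      rw [← hmap] at hb
      have ht : rpTarget domain (r[ni]) (s[nj]) = [] := List.map_eq_nil_iff.mp hb
      rw [ht] at hperm
      exact hperm.symm.eq_nil
    · intro hb
      rw [hb] at hperm
      rw [← hmap, hperm.eq_nil]
      rfl
  rw [List.filter_congr hcond]
  refine List.map_congr_left ?_
  intro j hjf
  have hj := List.mem_of_mem_filter hjf
  rw [PySem.List.mem_pyRange_one] at hj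
  obtain ⟨nj, rfl⟩ : ∃ nj : Nat, j = (nj : Int) := ⟨j.toNat, (Int.toNat_of_nonneg hj.1).symm⟩
  have hnjLt : nj < s.length := by
    have h := hj.2; simp only [PySem.List.len] at h; exact_mod_cast h
  have hgets : PySem.List.pyGetD s ((nj : Nat) : Int) [] = s[nj] := by
    rw [PySem.List.pyGetD_natCast]; exact List.getD_eq_getElem s [] hnjLt
  rw [hgetr, hgets, sorted_rpBuckets r s domain ni nj hniLt hnjLt, map_rpTarget]
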